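-- pv_equiv track=rewrite | github.com/ksemiya/password_solver | main.py | from_svg_to_FEN
-- ===== SOURCE A (Python) =====
-- def color_move(chess_move):
--     if "White" in chess_move:
--         return "w"
--     if "Black" in chess_move:
--         return "b"
--     return "WRONG MOVE"
--
-- def from_svg_to_FEN(chess_position, chess_move):
--     # Remove leading/trailing white space and split the string into lines
--     rows = chess_position.strip().split("\n")
--
--     # Initialize an empty list to hold FEN rows
--     fen_rows = []
--
--     # Iterate over rows
--     for row in rows:
--         # Remove leading/trailing white space and split row into squares
--         squares = row.strip().split(" ")
--         # Initialize counter for empty squares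
--         empty = 0
--         # Initialize an empty string to hold FEN for this row
--         fen_row = ""
--         # Iterate over squares
--         for square in squares:
--             if square == ".":
--                 # Increment counter for empty squares
--                 empty += 1
--             else:
--                 # If the square is not empty and there were empty squares before, add count to FEN
--                 if empty > 0:
--                     fen_row += str(empty)
--                     # Reset empty squares counter
--                     empty = 0
--                 # Add piece to FEN
--                 fen_row += square
--         # If the row ends with one or more empty squares, add count to FEN
--         if empty > 0:
--             fen_row += str(empty)
--         # Add FEN for this row to the list of FEN rows
--         fen_rows.append(fen_row)
--     # Join the FEN rows with slashes to get the final FEN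
--     fen_board = "/".join(fen_rows)
--     fen = fen_board + " " + color_move(chess_move) + " - - 0 1"
--
--     return fen
-- ===== SOURCE B (Python) =====
-- def color_move(chess_move):
--     if "White" in chess_move:
--         return "w"
--     if "Black" in chess_move:
--         return "b"
--     return "WRONG MOVE"
--
--
-- def _encode_row(squares):
--     # Run-length scan with two indices: a run of "." becomes its length,
--     # any other token is copied verbatim.
--     parts = []
--     i = 0
--     n = len(squares)
--     while i < n:
--         if squares[i] == ".":
--             j = i
--             while j < n and squares[j] == ".":
--                 j += 1
--             parts.append(str(j - i))
--             i = j
--         else: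
--             parts.append(squares[i])
--             i += 1
--     return "".join(parts)
--
--
-- def from_svg_to_FEN(chess_position, chess_move):
--     fen_rows = [_encode_row(row.strip().split(" "))
--                 for row in chess_position.strip().split("\n")]
--     return "/".join(fen_rows) + " " + color_move(chess_move) + " - - 0 1"
-- ===== Notes on version B (the rewrite author's own statement) =====
-- stated objective: alternative
-- what changed: Replaces A's stateful empty-counter/flush accumulator (pending count carried across iterations and flushed at piece boundaries and row end) with a run-length scan: each maximal run of '.' is consumed in one inner scan and emitted as its length, pieces are copied verbatim, and the row is assembled by joining the collected parts.
import Mathlib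
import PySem

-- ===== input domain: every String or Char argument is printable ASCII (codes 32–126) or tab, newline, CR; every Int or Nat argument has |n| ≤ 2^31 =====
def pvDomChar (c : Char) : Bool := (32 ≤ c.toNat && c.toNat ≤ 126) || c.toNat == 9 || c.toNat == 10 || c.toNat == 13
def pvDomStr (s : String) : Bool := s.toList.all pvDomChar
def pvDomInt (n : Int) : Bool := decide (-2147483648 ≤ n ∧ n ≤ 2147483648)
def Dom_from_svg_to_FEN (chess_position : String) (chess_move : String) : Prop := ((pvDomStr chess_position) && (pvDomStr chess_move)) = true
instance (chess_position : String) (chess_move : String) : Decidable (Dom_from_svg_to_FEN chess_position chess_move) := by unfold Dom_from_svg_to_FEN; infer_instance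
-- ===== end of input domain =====

-- B replaces A's pending-empty-counter accumulator by a run-length scan over runs of "."
-- (objective: alternative decomposition, same cost).

-- helper shared verbatim by both Pythons (module function color_move)
def colorMove (chess_move : String) : String :=
  if PySem.Str.isIn "White" chess_move then "w"
  else if PySem.Str.isIn "Black" chess_move then "b"
  else "WRONG MOVE"

-- ===== PORT A =====
-- A's inner loop: state (fen_row, empty); flush the counter at each piece and at row end.
def from_svg_to_FEN (chess_position : String) (chess_move : String) : String :=
  let rows := (PySem.Str.split? (PySem.Str.strip chess_position) "\n").getD []
  let fen_rows := rows.foldl (fun acc row =>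
    let squares := (PySem.Str.split? (PySem.Str.strip row) " ").getD []
    let st := squares.foldl (fun (st : String × Int) square =>
      if square = "." then (st.1, st.2 + 1)
      else ((if st.2 > 0 then st.1 ++ PySem.Int.toStr st.2 else st.1) ++ square, 0))
      ("", (0 : Int))
    let fen_row := if st.2 > 0 then st.1 ++ PySem.Int.toStr st.2 else st.1
    acc ++ [fen_row]) ([] : List String)
  let fen_board := PySem.Str.join "/" fen_rows
  fen_board ++ " " ++ colorMove chess_move ++ " - - 0 1"

-- ===== PORT B =====
-- Source B's inner 'while j < n and squares[j] == "."' scan: count of leading dots and the remainder.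
def countDots : List String → Nat × List String
  | [] => (0, [])
  | s :: rest =>
    if s = "." then
      let p := countDots rest
      (p.1 + 1, p.2)
    else (0, s :: rest)

theorem countDots_length_le : ∀ (l : List String), (countDots l).2.length ≤ l.length
  | [] => by simp [countDots]
  | s :: rest => by
    by_cases h : s = "." <;> simp [countDots, h]
    exact Nat.le_succ_of_le (countDots_length_le rest)

-- Source B's outer while loop over i: emit the run length for a dot run, copy a piece token.
def encodeRowGo : List String → List String
  | [] => []
  | s :: rest =>
    if s = "." then
      let p := countDots rest
      PySem.Int.toStr ((p.1 + 1 : Nat) : Int) :: encodeRowGo p.2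
    else s :: encodeRowGo rest
  termination_by l => l.length
  decreasing_by
  · exact Nat.lt_succ_of_le (countDots_length_le rest)
  · simp

def encodeRow (squares : List String) : String :=
  PySem.Str.join "" (encodeRowGo squares)

def from_svg_to_FEN_alt (chess_position : String) (chess_move : String) : String :=
  let fen_rows := ((PySem.Str.split? (PySem.Str.strip chess_position) "\n").getD []).map
    (fun row => encodeRow ((PySem.Str.split? (PySem.Str.strip row) " ").getD []))
  PySem.Str.join "/" fen_rows ++ " " ++ colorMove chess_move ++ " - - 0 1"

-- ===== PRECONDITION & SPEC =====
def Spec_from_svg_to_FEN (chess_position : String) (chess_move : String) (out : String) : Prop := out = from_svg_to_FEN_alt chess_position chess_move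
instance (chess_position : String) (chess_move : String) (out : String) : Decidable (Spec_from_svg_to_FEN chess_position chess_move out) := by unfold Spec_from_svg_to_FEN; infer_instance

-- ===== CLAIM (what is proved, stated in full; the proofs are below) =====
def Claim_equal_from_svg_to_FEN : Prop := ∀ (chess_position : String) (chess_move : String), Dom_from_svg_to_FEN chess_position chess_move → Spec_from_svg_to_FEN chess_position chess_move (from_svg_to_FEN chess_position chess_move)

-- ===== LEMMAS AND PROOFS =====


-- proof-side names for A's inner loop step and its final flush
def foldAstep (st : String × Int) (square : String) : String × Int :=
  if square = "." then (st.1, st.2 + 1)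
  else ((if st.2 > 0 then st.1 ++ PySem.Int.toStr st.2 else st.1) ++ square, 0)

def flushA (st : String × Int) : String :=
  if st.2 > 0 then st.1 ++ PySem.Int.toStr st.2 else st.1

-- proof-side helper: B's encoding with a pending count of k dots already seen
def encAux (k : Nat) : List String → List String
  | [] => if 0 < k then [PySem.Int.toStr (k : Int)] else []
  | s :: rest =>
    if s = "." then encAux (k + 1) rest
    else (if 0 < k then [PySem.Int.toStr (k : Int)] else []) ++ s :: encAux 0 rest

theorem joinEmpty_nil : PySem.Str.join "" ([] : List String) = "" := by
  simp [PySem.Str.join, PySem.Chars.join, List.intercalate]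

theorem joinEmpty_cons (s : String) (l : List String) :
    PySem.Str.join "" (s :: l) = s ++ PySem.Str.join "" l := by
  cases l with
  | nil => simp [PySem.Str.join, PySem.Chars.join, List.intercalate]
  | cons t ts => simp [PySem.Str.join, PySem.Chars.join, List.intercalate]

-- A's fold with pending counter k and prefix fen, flushed at the end, equals fen ++ encAux k
theorem foldA_eq_encAux (squares : List String) : ∀ (fen : String) (k : Nat),
    flushA (squares.foldl foldAstep (fen, (k : Int)))
      = fen ++ PySem.Str.join "" (encAux k squares) := by
  induction squares with
  | nil =>
    intro fen k
    by_cases hk : 0 < k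
    · simp [flushA, encAux, hk, joinEmpty_cons, joinEmpty_nil]
    · simp [flushA, encAux, hk, joinEmpty_nil]
  | cons s rest ih =>
    intro fen k
    by_cases hs : s = "."
    · have hstep : foldAstep (fen, (k : Int)) s = (fen, ((k + 1 : Nat) : Int)) := by
        simp [foldAstep, hs]
      have henc : encAux k (s :: rest) = encAux (k + 1) rest := by simp [encAux, hs]
      rw [List.foldl_cons, hstep, ih, henc]
    · have hstep : foldAstep (fen, (k : Int)) s
          = ((if 0 < k then fen ++ PySem.Int.toStr (k : Int) else fen) ++ s, ((0 : Nat) : Int)) := by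
        by_cases hk : 0 < k
        · simp [foldAstep, hs, hk]
        · simp [foldAstep, hs, hk]
      rw [List.foldl_cons, hstep, ih]
      by_cases hk : 0 < k <;>
        simp [encAux, hs, hk, joinEmpty_cons, joinEmpty_nil, String.append_assoc]

-- encAux agrees with B's run-length scan
theorem encAux_eq_go : ∀ (squares : List String),
    encAux 0 squares = encodeRowGo squares ∧
    ∀ k : Nat, 0 < k → encAux k squares =
      PySem.Int.toStr ((k + (countDots squares).1 : Nat) : Int) :: encodeRowGo (countDots squares).2
  | [] => by
    constructor
    · simp [encAux, encodeRowGo]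
    · intro k hk; simp [encAux, countDots, encodeRowGo, hk]
  | s :: rest => by
    have ih := encAux_eq_go rest
    by_cases hs : s = "."
    · constructor
      · rw [show encAux 0 (s :: rest) = encAux 1 rest by simp [encAux, hs]]
        rw [ih.2 1 Nat.one_pos]
        simp [encodeRowGo, hs, Nat.add_comm]
      · intro k hk
        rw [show encAux k (s :: rest) = encAux (k + 1) rest by simp [encAux, hs]]
        rw [ih.2 (k + 1) (Nat.succ_pos k)]
        have hcd : (countDots (s :: rest)) = ((countDots rest).1 + 1, (countDots rest).2) := by
          simp [countDots, hs]
        rw [hcd]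
        congr 2
        omega
    · constructor
      · simp [encAux, hs, encodeRowGo, ih.1]
      · intro k hk
        have hcd : countDots (s :: rest) = (0, s :: rest) := by simp [countDots, hs]
        simp [encAux, hs, hk, hcd, encodeRowGo, ih.1]
  termination_by l => l.length

theorem rowA_eq_encodeRow (squares : List String) :
    flushA (squares.foldl foldAstep ("", (0 : Int))) = encodeRow squares := by
  have h := foldA_eq_encAux squares "" 0
  simpa [(encAux_eq_go squares).1, encodeRow] using h

-- ===== VERDICT (by name: the statement is the Claim_ definition above) =====
theorem from_svg_to_FEN_spec : Claim_equal_from_svg_to_FEN := by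
  intro chess_position chess_move _
  show from_svg_to_FEN chess_position chess_move = from_svg_to_FEN_alt chess_position chess_move
  simp only [from_svg_to_FEN, from_svg_to_FEN_alt]
  rw [PySem.List.foldl_append_singleton_eq_map]
  exact congrArg
    (fun l => PySem.Str.join "/" l ++ " " ++ colorMove chess_move ++ " - - 0 1")
    (by rw [List.nil_append]
        exact List.map_congr_left (fun row _ => rowA_eq_encodeRow _))
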